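-- pv_equiv track=rewrite | github.com/MinorClass/AI_Project | numgame_01.py | sequence_description
-- ===== SOURCE A (Python) =====
-- def sequence_description(seq):
--     counts = {}
--     for num in seq:
--         counts[num] = counts.get(num, 0) + 1
--
--     desc_list = []
--     for num in range(1, 10):
--         if num in counts and counts[num] > 1:
--             desc_list.append(f"숫자 {num}는 {counts[num]}번 누르세요.")
--     if not desc_list:
--         return "1~9까지 순서대로 누르세요."
--     return " ".join(desc_list)
-- ===== SOURCE B (Python) =====
-- def sequence_description(seq):
--     s = sorted(seq)
--     n = len(s)
--     parts = []
--     i = 0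
--     while i < n:
--         v = s[i]
--         j = i + 1
--         while j < n and s[j] == v:
--             j += 1
--         if 1 <= v <= 9 and j - i > 1:
--             parts.append(f"숫자 {v}는 {j - i}번 누르세요.")
--         i = j
--     if not parts:
--         return "1~9까지 순서대로 누르세요."
--     return " ".join(parts)
-- ===== Notes on version B (the rewrite author's own statement) =====
-- stated objective: alternative
-- what changed: Replaced the hash-counter build plus digit-by-digit lookup loop with sort-then-run-length-scan: B sorts the sequence and walks it once with two indices, emitting a message for each run of a digit 1..9 longer than one (runs of a sorted list appear in ascending digit order, so the output order is identical).
import Mathlib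
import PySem

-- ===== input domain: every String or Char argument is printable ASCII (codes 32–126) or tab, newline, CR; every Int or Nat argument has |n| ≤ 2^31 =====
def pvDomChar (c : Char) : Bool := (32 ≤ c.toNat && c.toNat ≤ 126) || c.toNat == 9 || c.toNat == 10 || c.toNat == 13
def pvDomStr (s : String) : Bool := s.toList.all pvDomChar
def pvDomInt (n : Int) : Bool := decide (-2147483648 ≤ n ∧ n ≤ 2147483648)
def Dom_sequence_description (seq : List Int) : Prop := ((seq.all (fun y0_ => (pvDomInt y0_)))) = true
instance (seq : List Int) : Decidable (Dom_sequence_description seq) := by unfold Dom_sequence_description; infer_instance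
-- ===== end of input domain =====

-- B replaces A's counter-dict + digit loop with sort-then-run-length-scan (alternative algorithm, same output).

-- ===== PORT A =====
def sequence_description (seq : List Int) : String :=
  let counts := seq.foldl (fun d num => d.insert num (d.getD num 0 + 1)) (PySem.Dict.empty)
  let descList := (PySem.List.pyRange 1 10 1).foldl (fun acc num =>
    if counts.contains num && decide (counts.getD num 0 > 1) then
      acc ++ ["숫자 " ++ PySem.Int.toStr num ++ "는 " ++ PySem.Int.toStr (counts.getD num 0) ++ "번 누르세요."]
    else acc) []
  if descList.isEmpty then "1~9까지 순서대로 누르세요."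
  else PySem.Str.join " " descList

-- ===== PORT B =====
-- message for digit v pressed k times (the same f-string B formats)
def pvMsg (v k : Int) : String :=
  "숫자 " ++ PySem.Int.toStr v ++ "는 " ++ PySem.Int.toStr k ++ "번 누르세요."

-- the inner while: advance j over the run of v (s.getD j 0 = s[j]; the access is guarded by j < n)
def pvRunEnd (s : List Int) (n : Nat) (v : Int) (j : Nat) : Nat :=
  if _h : j < n ∧ s.getD j 0 == v then pvRunEnd s n v (j + 1) else j
termination_by n - j
decreasing_by omega

lemma le_pvRunEnd (s : List Int) (n : Nat) (v : Int) : ∀ j, j ≤ pvRunEnd s n v j := by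
  intro j
  induction hn : n - j using Nat.strong_induction_on generalizing j with
  | _ m ih =>
    rw [pvRunEnd]
    split
    · next h => exact le_trans (by omega) (ih (n - (j + 1)) (by omega) (j + 1) rfl)
    · exact le_rfl

-- the outer while over runs of the sorted list
def pvRunLoop (s : List Int) (n : Nat) (i : Nat) (parts : List String) : List String :=
  if h : i < n then
    let v := s.getD i 0
    let j := pvRunEnd s n v (i + 1)
    let parts' := if 1 ≤ v ∧ v ≤ 9 ∧ 1 < (j : Int) - (i : Int) then
        parts ++ [pvMsg v ((j : Int) - (i : Int))] else parts
    pvRunLoop s n j parts'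
  else parts
termination_by n - i
decreasing_by have := le_pvRunEnd s n (s.getD i 0) (i + 1); omega

def sequence_description_alt (seq : List Int) : String :=
  let s := PySem.List.sorted seq (fun x => x) false
  let parts := pvRunLoop s s.length 0 []
  if parts.isEmpty then "1~9까지 순서대로 누르세요."
  else PySem.Str.join " " parts

-- ===== PRECONDITION & SPEC =====
def Spec_sequence_description (seq : List Int) (out : String) : Prop := out = sequence_description_alt seq
instance (seq : List Int) (out : String) : Decidable (Spec_sequence_description seq out) := by unfold Spec_sequence_description; infer_instance

-- ===== CLAIM (what is proved, stated in full; the proofs are below) =====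
def Claim_equal_sequence_description : Prop := ∀ (seq : List Int), Dom_sequence_description seq → Spec_sequence_description seq (sequence_description seq)

-- ===== LEMMAS AND PROOFS =====

-- proof-side model of the outer loop: peel the leading run off the remaining suffix
def pvRuns (rest : List Int) (parts : List String) : List String :=
  match rest with
  | [] => parts
  | v :: t =>
    let k : Nat := 1 + (t.takeWhile (fun x => x == v)).length
    let parts' := if 1 ≤ v ∧ v ≤ 9 ∧ 1 < (k : Int) then parts ++ [pvMsg v (k : Int)] else parts
    pvRuns (t.drop (k - 1)) parts'
termination_by rest.length
decreasing_by simp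

-- the canonical per-digit block: what digit d contributes to the output, given source list x
def pvBlock (x : List Int) (d : Int) : List String :=
  if 1 < (x.count d : Int) then [pvMsg d (x.count d : Int)] else []

lemma pvBlock_congr (x y : List Int) (d : Int) (h : x.count d = y.count d) :
    pvBlock x d = pvBlock y d := by simp [pvBlock, h]

-- in a sorted tail whose elements are all ≥ v, everything after the leading v-run is > v
lemma mem_dropWhile_gt (v : Int) (t : List Int) (ht : t.Pairwise (· ≤ ·))
    (hge : ∀ x ∈ t, v ≤ x) :
    ∀ x ∈ t.dropWhile (fun y => y == v), v < x := by
  induction t with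
  | nil => intro x hx; simp at hx
  | cons a t ih =>
    intro x hx
    rcases List.pairwise_cons.mp ht with ⟨ha, ht'⟩
    by_cases h : a = v
    · subst h
      rw [List.dropWhile_cons_of_pos (by simp)] at hx
      exact ih ht' (fun y hy => hge y (List.mem_cons_of_mem _ hy)) x hx
    · rw [List.dropWhile_cons_of_neg (by simp [h])] at hx
      have hva : v < a := lt_of_le_of_ne (hge a (List.mem_cons_self)) (Ne.symm h)
      rcases List.mem_cons.mp hx with rfl | hx'
      · exact hva
      · exact lt_of_lt_of_le hva (ha x hx')

-- dropping the leading run is dropWhile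
lemma drop_takeWhile_length (t : List Int) (p : Int → Bool) :
    t.drop (t.takeWhile p).length = t.dropWhile p := by
  induction t with
  | nil => rfl
  | cons a t ih => by_cases h : p a <;> simp [h, ih]

-- peeling one value v off the front of the digit scan, for any strictly increasing digit list
lemma flatMap_step (ds : List Int) (hds : ds.Pairwise (· < ·)) (s rest : List Int) (v : Int) (k : Int)
    (hv : (s.count v : Int) = k)
    (hne : ∀ d, d ≠ v → s.count d = rest.count d)
    (hlt : ∀ d, d < v → s.count d = 0)
    (hle : ∀ d, d ≤ v → rest.count d = 0) :
    ds.flatMap (pvBlock s) = (if v ∈ ds ∧ 1 < k then [pvMsg v k] else []) ++ ds.flatMap (pvBlock rest) := by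
  induction ds with
  | nil => simp
  | cons d ds' ih =>
    rcases List.pairwise_cons.mp hds with ⟨hd, hds'⟩
    rcases lt_trichotomy d v with h | h | h
    · have h1 : pvBlock s d = [] := by simp [pvBlock, hlt d h]
      have h2 : pvBlock rest d = [] := by simp [pvBlock, hle d (le_of_lt h)]
      have hvd : ¬ v = d := by omega
      simp [List.flatMap_cons, h1, h2, ih hds', List.mem_cons, hvd]
    · subst h
      have h1 : pvBlock s d = if 1 < k then [pvMsg d k] else [] := by
        simp only [pvBlock, hv]
      have h2 : pvBlock rest d = [] := by simp [pvBlock, hle d le_rfl]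
      have h3 : ds'.flatMap (pvBlock s) = ds'.flatMap (pvBlock rest) :=
        List.flatMap_congr (fun x hx => pvBlock_congr _ _ _ (hne x (by have := hd x hx; omega)))
      simp [List.flatMap_cons, h1, h2, h3, List.mem_cons]
    · have hmem : v ∉ d :: ds' := by
        intro hm
        rcases List.mem_cons.mp hm with h' | h'
        · omega
        · have := hd v h'; omega
      have hfm : (d :: ds').flatMap (pvBlock s) = (d :: ds').flatMap (pvBlock rest) := by
        refine List.flatMap_congr (fun x hx => pvBlock_congr _ _ _ (hne x ?_))
        rcases List.mem_cons.mp hx with rfl | h'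
        · omega
        · have := hd x h'; omega
      simp [hfm, hmem]

-- the run-length scan of a sorted list produces exactly the per-digit blocks 1..9
lemma pvRuns_eq_flatMap : ∀ (n : Nat) (s : List Int), s.length ≤ n → s.Pairwise (· ≤ ·) →
    ∀ (parts : List String),
    pvRuns s parts = parts ++ (PySem.List.pyRange 1 10 1).flatMap (pvBlock s) := by
  intro n
  induction n with
  | zero =>
    intro s hs _ parts
    have : s = [] := List.length_eq_zero_iff.mp (Nat.le_zero.mp hs)
    subst this
    simp [pvRuns, pvBlock]
  | succ n ih =>
    intro s hlen hsort parts
    match s with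
    | [] => simp [pvRuns, pvBlock]
    | v :: t =>
      rcases List.pairwise_cons.mp hsort with ⟨hge, ht⟩
      rw [pvRuns]
      have hdrop : t.drop (1 + (t.takeWhile (fun x => x == v)).length - 1)
          = t.dropWhile (fun x => x == v) := by
        rw [show 1 + (t.takeWhile (fun x => x == v)).length - 1
              = (t.takeWhile (fun x => x == v)).length by omega]
        exact drop_takeWhile_length t _
      set L := t.takeWhile (fun x => x == v) with hL
      set R := t.dropWhile (fun x => x == v) with hR
      have hsplit : L ++ R = t := List.takeWhile_append_dropWhile
      have hLmem : ∀ x ∈ L, x = v := fun x hx => by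
        have := List.mem_takeWhile_imp hx; simpa using this
      have hRgt : ∀ x ∈ R, v < x := mem_dropWhile_gt v t ht hge
      -- count facts
      have hcv : ((v :: t).count v : Int) = (1 + L.length : Int) := by
        have h1 : L.count v = L.length := List.count_eq_length.mpr (fun b hb => (hLmem b hb).symm)
        have h2 : R.count v = 0 := List.count_eq_zero.mpr (fun hm => lt_irrefl v (hRgt v hm))
        have h3 : t.count v = L.length := by rw [← hsplit, List.count_append, h1, h2]; omega
        have h4 : (v :: t).count v = 1 + L.length := by rw [List.count_cons_self, h3]; omega
        exact_mod_cast congrArg (fun n : Nat => (n : Int)) h4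
      have hcne : ∀ d, d ≠ v → (v :: t).count d = R.count d := by
        intro d hd
        have h1 : L.count d = 0 := List.count_eq_zero.mpr (fun hm => hd (hLmem d hm))
        have h0 : (v :: t).count d = t.count d := by simp [Ne.symm hd]
        rw [h0, ← hsplit, List.count_append, h1, Nat.zero_add]
      have hclt : ∀ d, d < v → (v :: t).count d = 0 := by
        intro d hd
        refine List.count_eq_zero.mpr (fun hm => ?_)
        rcases List.mem_cons.mp hm with rfl | hm'
        · omega
        · have := hge d hm'; omega
      have hcle : ∀ d, d ≤ v → R.count d = 0 := by
        intro d hd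
        refine List.count_eq_zero.mpr (fun hm => ?_)
        have := hRgt d hm; omega
      -- tail is still sorted and shorter
      have hRsort : R.Pairwise (· ≤ ·) := List.Pairwise.sublist (List.dropWhile_sublist _) ht
      have hRlen : R.length ≤ n := by
        have h1 : R.Sublist t := List.dropWhile_sublist _
        have := h1.length_le
        simp at hlen; omega
      rw [hdrop, ih R hRlen hRsort]
      have hstep := flatMap_step (PySem.List.pyRange 1 10 1) (by decide) (v :: t) R v
        ((1 + L.length : Nat) : Int) (by push_cast at hcv ⊢; exact hcv) hcne hclt hcle
      rw [hstep]
      have hcond : (1 ≤ v ∧ v ≤ 9 ∧ 1 < ((1 + L.length : Nat) : Int))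
          ↔ (v ∈ PySem.List.pyRange 1 10 1 ∧ 1 < ((1 + L.length : Nat) : Int)) := by
        rw [PySem.List.mem_pyRange_one]; omega
      split_ifs with h1 h2 h2
      · simp
      · exact absurd (hcond.mp h1) h2
      · exact absurd (hcond.mpr h2) h1
      · simp

-- the index-based inner while computes the takeWhile length of the suffix
lemma pvRunEnd_eq (s : List Int) (v : Int) :
    ∀ j, j ≤ s.length →
    pvRunEnd s s.length v j = j + ((s.drop j).takeWhile (fun x => x == v)).length := by
  intro j
  induction hn : s.length - j using Nat.strong_induction_on generalizing j with
  | _ m ih =>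
    intro hj
    rw [pvRunEnd]
    rcases Nat.lt_or_ge j s.length with h | h
    · have hdropj : s.drop j = s[j] :: s.drop (j + 1) := List.drop_eq_getElem_cons h
      have hget : s.getD j 0 = s[j] := List.getD_eq_getElem s 0 h
      by_cases hv : s[j] = v
      · rw [dif_pos ⟨h, by simp [List.getD, List.getElem?_eq_getElem h, hv]⟩,
          ih (s.length - (j + 1)) (by omega) (j + 1) rfl (by omega), hdropj,
          List.takeWhile_cons_of_pos (by simp [hv])]
        simp; omega
      · rw [dif_neg (by simp [List.getD, List.getElem?_eq_getElem h, hv]), hdropj, List.takeWhile_cons_of_neg (by simp [hv])]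
        simp
    · have : j = s.length := by omega
      rw [dif_neg (by omega)]
      simp [this]

-- the index-based outer while is the run-peeling scan of the remaining suffix
lemma pvRunLoop_eq (s : List Int) :
    ∀ i, i ≤ s.length → ∀ parts, pvRunLoop s s.length i parts = pvRuns (s.drop i) parts := by
  intro i
  induction hn : s.length - i using Nat.strong_induction_on generalizing i with
  | _ m ih =>
    intro hi parts
    rw [pvRunLoop]
    rcases Nat.lt_or_ge i s.length with h | h
    · have hdropi : s.drop i = s[i] :: s.drop (i + 1) := List.drop_eq_getElem_cons h
      have hget : s.getD i 0 = s[i] := List.getD_eq_getElem s 0 h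
      have hre := pvRunEnd_eq s s[i] (i + 1) (by omega)
      have hj1 := le_pvRunEnd s s.length s[i] (i + 1)
      have hjle : pvRunEnd s s.length s[i] (i + 1) ≤ s.length := by
        have := (List.takeWhile_sublist (l := s.drop (i + 1)) (fun x => x == s[i])).length_le
        rw [hre]; simp at this ⊢; omega
      rw [dif_pos h]
      rw [hdropi, pvRuns]
      simp only [hget]
      set L := ((s.drop (i + 1)).takeWhile (fun x => x == s[i])).length with hL
      have hjv : pvRunEnd s s.length s[i] (i + 1) = i + 1 + L := hre
      have hki : ((1 + L : Nat) : Int) = (pvRunEnd s s.length s[i] (i + 1) : Int) - (i : Int) := by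
        rw [hjv]; push_cast; ring
      have hdd : (s.drop (i + 1)).drop ((1 + L) - 1) = s.drop (pvRunEnd s s.length s[i] (i + 1)) := by
        rw [List.drop_drop, hjv]
        congr 1; omega
      rw [ih (s.length - pvRunEnd s s.length s[i] (i + 1)) (by omega) _ rfl (by omega)]
      rw [← hki, ← hdd]
    · rw [dif_neg (by omega)]
      have : s.drop i = [] := List.drop_eq_nil_of_le (by omega)
      rw [this, pvRuns]

-- A-side: membership in the counter is implied by count > 1
lemma cond_eq (seq : List Int) (num : Int) :
    ((PySem.Dict.counter seq).contains num && decide (((seq.count num : Int)) > 1))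
      = decide (((seq.count num : Int)) > 1) := by
  by_cases h : num ∈ seq
  · simp [PySem.Dict.contains_iff_mem_keys, PySem.Dict.keys_counter, PySem.Set.mem_ofList, h]
  · have : seq.count num = 0 := List.count_eq_zero.mpr h
    simp [this]

-- ===== VERDICT (by name: the statement is the Claim_ definition above) =====
theorem sequence_description_spec : Claim_equal_sequence_description := by
  intro seq _
  show sequence_description seq = sequence_description_alt seq
  have hc : seq.foldl (fun d num => d.insert num (d.getD num 0 + 1)) (PySem.Dict.empty)
      = PySem.Dict.counter seq := PySem.Dict.foldl_insert_getD_add_one_eq_counter seq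
  -- A's loop is the flatMap of per-digit blocks of seq
  have hA : (PySem.List.pyRange 1 10 1).foldl (fun acc num =>
      if (PySem.Dict.counter seq).contains num && decide ((PySem.Dict.counter seq).getD num 0 > 1) then
        acc ++ ["숫자 " ++ PySem.Int.toStr num ++ "는 " ++ PySem.Int.toStr ((PySem.Dict.counter seq).getD num 0) ++ "번 누르세요."]
      else acc) ([] : List String)
      = (PySem.List.pyRange 1 10 1).foldl (fun acc num => acc ++ pvBlock seq num) ([] : List String) := by
    apply PySem.List.foldl_congr_mem
    intro acc num _
    simp only [PySem.Dict.getD_counter, cond_eq, pvBlock, pvMsg]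
    split_ifs with h h' h' <;> simp_all
  -- B's scan is the flatMap of per-digit blocks of sorted seq = of seq
  have hperm : (PySem.List.sorted seq (fun x => x) false).Perm seq := PySem.List.sorted_perm seq (fun x => x) false
  have hB : pvRunLoop (PySem.List.sorted seq (fun x => x) false)
        (PySem.List.sorted seq (fun x => x) false).length 0 []
      = (PySem.List.pyRange 1 10 1).flatMap (pvBlock seq) := by
    rw [pvRunLoop_eq _ 0 (by omega) [], List.drop_zero]
    rw [pvRuns_eq_flatMap (PySem.List.sorted seq (fun x => x) false).length _ le_rfl
          (PySem.List.sorted_pairwise seq (fun x => x)) []]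
    rw [List.nil_append]
    exact List.flatMap_congr (fun d _ => pvBlock_congr _ _ _ (hperm.count_eq d))
  simp only [sequence_description, sequence_description_alt, hc, hA,
    PySem.List.foldl_append_eq_flatMap, List.nil_append, hB]
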